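-- pv_equiv track=rewrite | github.com/TeamLab/lab_for_gachon_cs50 | working_lab/working_lab_4_sort_english/sort_english.py | unequal_method
-- ===== SOURCE A (Python) =====
-- def dict_of_english():
--     # '''
--     # Input :
--     #   -없음
--     # Output :
--     #   -알파벳의 우선순위를 구분할 수 있는 딕셔너리
--     #   -알파벳은 영어대문자만 가능
--     #   -알파벳 value 값은 구분만 할수 있으면 됨
--     # Examples :
--     #   >>>import sort_english as se
--     #   >>>se.dict_of_english()
--     #   {'C': 3, 'R': 18, 'W': 23, 'T': 20, 'U': 21, 'Q': 17, 'K': 11, 'Z': 26, 'S': 19, 'V': 22, 'L': 12, 'A': 1, 'Y': 25, 'N': 14, 'H': 8, 'M': 13, 'E': 5, 'O': 15, 'B': 2, 'G': 7, 'P': 16, 'F': 6, 'J': 10, 'I': 9, 'D': 4, 'X': 24}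
--     # 원한다면 다른숫자 넣어줘도됨
--     # '''
--     english_dict = {}
--     english_list = """ABCDEFGHIJKLMNOPQRSTUVWXYZ"""
--     for num in range(len(english_list),0,-1):
--         english_dict[english_list[num-1]] = num
--     return english_dict
--
-- def unequal_method(count_english_values,count_english):
--     # '''
--     # Input :
--     #   -count_english_values: max_method()의 결과값, 자연수
--     #   -count_english: count_element_method()의 결과값, 딕트 값
--     # Output :
--     #   -input값의 count_english에 value값들중에 count_english_values인 key값을 찾아 count_english_values*key 값을 반환해준다.    # Examples :
--     #   >>>import sort_english as se
--     #   >>>se.unequal_method(4, {'D': 4, 'B': 4, 'A': 4, 'C': 4})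
--     #   AAAABBBBCCCCDDDD
--     #   >>>se.unequal_method(2, {'D': 2, 'B': 2, 'A': 1, 'C': 1})
--     #   BBDD
--     # '''
--     result = ""
--     primary_count = []
--     primary_english = []
--     doct_of_english = dict_of_english()
--     change_keys_values = {}
--     english_list = """ABCDEFGHIJKLMNOPQRSTUVWXYZ"""
--     for num in range(len(doct_of_english),0,-1):
--         change_keys_values[num] = english_list[num-1]
--
--     for sentence in count_english.keys():
--         if count_english[sentence]==count_english_values:
--             primary_english.append(sentence)
--             primary_count.append(doct_of_english[sentence])
--
--     for min_value in range(len(primary_english)):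
--         min_values = min(primary_count)
--         result = result + count_english_values * change_keys_values[min_values]
--         primary_english.remove(primary_english[primary_count.index(min_values)])
--
--         primary_count.remove(min_values)
--     return result
-- ===== SOURCE B (Python) =====
-- ALPHABET = "ABCDEFGHIJKLMNOPQRSTUVWXYZ"
--
--
-- def unequal_method(count_english_values, count_english):
--     # One pass over the fixed alphabet (already in priority order): no
--     # priority dicts, no selection-sort min/index/remove loop.
--     return "".join(
--         letter * count_english_values
--         for letter in ALPHABET
--         if count_english.get(letter) == count_english_values
--     )
-- ===== Notes on version B (the rewrite author's own statement) =====
-- stated objective: simpler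
-- what changed: Replaces the two priority dicts and the quadratic selection-sort extraction loop (min/index/remove) by a single pass over the fixed 26-letter alphabet, which is already in priority order, emitting letter*count for each letter whose count matches.
import Mathlib
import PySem

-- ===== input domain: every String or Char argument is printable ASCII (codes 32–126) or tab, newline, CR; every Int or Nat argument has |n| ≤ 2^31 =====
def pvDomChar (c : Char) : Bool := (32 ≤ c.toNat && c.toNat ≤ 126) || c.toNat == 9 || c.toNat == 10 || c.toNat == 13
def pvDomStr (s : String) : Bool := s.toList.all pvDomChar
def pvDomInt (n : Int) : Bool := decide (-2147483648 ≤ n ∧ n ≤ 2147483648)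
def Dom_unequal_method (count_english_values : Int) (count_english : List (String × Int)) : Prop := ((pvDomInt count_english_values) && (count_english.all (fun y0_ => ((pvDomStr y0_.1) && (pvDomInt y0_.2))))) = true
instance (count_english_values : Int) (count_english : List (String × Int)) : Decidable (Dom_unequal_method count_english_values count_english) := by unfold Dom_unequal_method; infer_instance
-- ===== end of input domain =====

-- B replaces A's priority dicts and quadratic selection-sort extraction by one pass
-- over the fixed alphabet (objective: simpler).

-- ===== PORT A =====

def pvAlphabet : List Char := "ABCDEFGHIJKLMNOPQRSTUVWXYZ".toList

-- Python's english_list[num-1] (IndexError impossible here: num ∈ 1..26); '.getD' only totalizes.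
def dict_of_english : PySem.Dict String Int :=
  (PySem.List.pyRange (pvAlphabet.length : Int) 0 (-1)).foldl
    (fun d num => d.insert (String.ofList [(PySem.List.pyGet? pvAlphabet (num - 1)).getD 'A']) num)
    PySem.Dict.empty

def change_keys_values : PySem.Dict Int String :=
  (PySem.List.pyRange (dict_of_english.size : Int) 0 (-1)).foldl
    (fun d num => d.insert num (String.ofList [(PySem.List.pyGet? pvAlphabet (num - 1)).getD 'A']))
    PySem.Dict.empty

-- one iteration of A's selection loop; state = (result chars, primary_english, primary_count).
-- change_keys_values[min_values] is a raising lookup, '.getD ""' only totalizes (KeyError excluded by Pre_).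
def pvSelStep (n : Int) (st : List Char × List String × List Int) :
    List Char × List String × List Int :=
  match PySem.List.min? st.2.2 (fun x => x) with
  | none => st                                  -- min([]) ValueError; unreachable (loop count = list length)
  | some m =>
    let res := st.1 ++ PySem.List.pyRepeat (change_keys_values.getD m "").toList n
    let pe :=
      match PySem.List.index? st.2.2 m with
      | none => st.2.1
      | some i =>
        match PySem.List.pyGet? st.2.1 (i : Int) with
        | none => st.2.1
        | some e => (PySem.List.remove? st.2.1 e).getD st.2.1
    let pc := (PySem.List.remove? st.2.2 m).getD st.2.2
    (res, pe, pc)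

-- 'for min_value in range(len(primary_english))': the loop variable is unused, so the counted loop
def pvSelLoop (n : Int) : Nat → (List Char × List String × List Int) →
    List Char × List String × List Int
  | 0, st => st
  | fuel + 1, st => pvSelLoop n fuel (pvSelStep n st)

def unequal_method (count_english_values : Int) (count_english : List (String × Int)) : String :=
  let cd := PySem.Dict.ofList count_english
  -- doct_of_english[sentence] is a raising lookup; '.getD 0' only totalizes (KeyError excluded by Pre_)
  let pairs := cd.keys.foldl
    (fun (s : List String × List Int) sentence =>
      if cd.getD sentence 0 == count_english_values
      then (s.1 ++ [sentence], s.2 ++ [dict_of_english.getD sentence 0])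
      else s) ([], [])
  String.ofList (pvSelLoop count_english_values pairs.1.length ([], pairs.1, pairs.2)).1

-- ===== PORT B =====

def unequal_method_alt (count_english_values : Int) (count_english : List (String × Int)) : String :=
  let cd := PySem.Dict.ofList count_english
  PySem.Str.join ""
    ((pvAlphabet.filter (fun c => cd.get? (String.ofList [c]) == some count_english_values)).map
      (fun c => String.ofList (PySem.List.pyRepeat [c] count_english_values)))

-- ===== PRECONDITION & SPEC =====

def pvLetters : List String := pvAlphabet.map (fun c => String.ofList [c])

-- Pre_ excludes exactly the inputs on which A raises KeyError: a dict entry whose value equals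
-- count_english_values but whose key is not one of the 26 single uppercase letters.
def Pre_unequal_method (count_english_values : Int) (count_english : List (String × Int)) : Prop :=
  ∀ p ∈ (PySem.Dict.ofList count_english).items, p.2 = count_english_values → p.1 ∈ pvLetters

instance (count_english_values : Int) (count_english : List (String × Int)) :
    Decidable (Pre_unequal_method count_english_values count_english) := by
  unfold Pre_unequal_method; infer_instance

def pvWitness_unequal_method : Int × (List (String × Int)) :=
  (2, [("D", 2), ("B", 2), ("A", 1), ("C", 1)])

def Spec_unequal_method (count_english_values : Int) (count_english : List (String × Int))
    (out : String) : Prop := out = unequal_method_alt count_english_values count_english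

instance (count_english_values : Int) (count_english : List (String × Int)) (out : String) :
    Decidable (Spec_unequal_method count_english_values count_english out) := by
  unfold Spec_unequal_method; infer_instance

-- ===== CLAIM (what is proved, stated in full; the proofs are below) =====
def Claim_equal_unequal_method : Prop := ∀ (count_english_values : Int) (count_english : List (String × Int)), Dom_unequal_method count_english_values count_english → Pre_unequal_method count_english_values count_english → Spec_unequal_method count_english_values count_english (unequal_method count_english_values count_english)

-- ===== LEMMAS AND PROOFS =====

def pvAsc : List Int := (List.range 26).map (fun i => ((i : Int) + 1))

def pvPrio (c : Char) : Int := dict_of_english.getD (String.ofList [c]) 0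

lemma pvAscPairwise : pvAsc.Pairwise (· < ·) := by decide

set_option maxRecDepth 8192 in
lemma pvDictEval : dict_of_english = (⟨[("Z", 26), ("Y", 25), ("X", 24), ("W", 23), ("V", 22), ("U", 21), ("T", 20), ("S", 19), ("R", 18), ("Q", 17), ("P", 16), ("O", 15), ("N", 14), ("M", 13), ("L", 12), ("K", 11), ("J", 10), ("I", 9), ("H", 8), ("G", 7), ("F", 6), ("E", 5), ("D", 4), ("C", 3), ("B", 2), ("A", 1)]⟩ : PySem.Dict String Int) := by decide

set_option maxRecDepth 8192 in
lemma pvChangeEval : change_keys_values = (⟨[(26, "Z"), (25, "Y"), (24, "X"), (23, "W"), (22, "V"), (21, "U"), (20, "T"), (19, "S"), (18, "R"), (17, "Q"), (16, "P"), (15, "O"), (14, "N"), (13, "M"), (12, "L"), (11, "K"), (10, "J"), (9, "I"), (8, "H"), (7, "G"), (6, "F"), (5, "E"), (4, "D"), (3, "C"), (2, "B"), (1, "A")]⟩ : PySem.Dict Int String) := by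
  unfold change_keys_values
  rw [pvDictEval]
  decide

set_option maxRecDepth 8192 in
lemma pvMapPrio : pvAlphabet.map pvPrio = pvAsc := by
  show pvAlphabet.map (fun c => dict_of_english.getD (String.ofList [c]) 0) = pvAsc
  simp only [pvDictEval]
  decide

lemma pvAlphabetEval : pvAlphabet
    = ['A','B','C','D','E','F','G','H','I','J','K','L','M',
       'N','O','P','Q','R','S','T','U','V','W','X','Y','Z'] := by decide

set_option maxRecDepth 4096 in
lemma pvChangeLetter : ∀ c ∈ pvAlphabet, change_keys_values.getD (pvPrio c) "" = String.ofList [c] := by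
  rw [pvAlphabetEval]
  intro c hc
  fin_cases hc <;>
    simp [pvPrio, pvChangeEval, pvDictEval, PySem.Dict.getD_eq_get?_getD, PySem.Dict.get?_mk_cons]

set_option maxRecDepth 8192 in
lemma pvPrioInj : ∀ s ∈ pvLetters, ∀ t ∈ pvLetters,
    dict_of_english.getD s 0 = dict_of_english.getD t 0 → s = t := by
  simp only [pvDictEval]
  decide

set_option maxRecDepth 8192 in
lemma pvPrioMemAsc : ∀ s ∈ pvLetters, dict_of_english.getD s 0 ∈ pvAsc := by
  simp only [pvDictEval]
  decide

lemma pvIntercalateNil {α : Type} (L : List (List α)) :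
    List.intercalate ([] : List α) L = L.flatten := by
  induction L with
  | nil => rfl
  | cons a t ih =>
    cases t with
    | nil => simp [List.intercalate]
    | cons b t2 =>
      simp only [List.intercalate] at ih ⊢
      show (a :: ([] : List α) :: ((b :: t2).intersperse [])).flatten = (a :: b :: t2).flatten
      simp [ih]

lemma pvPairFold (cd : PySem.Dict String Int) (n : Int) :
    ∀ (ks : List String) (a1 : List String) (a2 : List Int),
    ks.foldl (fun (s : List String × List Int) k =>
        if cd.getD k 0 == n then (s.1 ++ [k], s.2 ++ [dict_of_english.getD k 0]) else s) (a1, a2)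
      = (a1 ++ ks.filter (fun k => cd.getD k 0 == n),
         a2 ++ (ks.filter (fun k => cd.getD k 0 == n)).map (fun k => dict_of_english.getD k 0)) := by
  intro ks
  induction ks with
  | nil => intro a1 a2; simp
  | cons k ks ih =>
    intro a1 a2
    by_cases hb : (cd.getD k 0 == n) = true
    · simp only [List.foldl_cons, List.filter_cons, if_pos hb]
      rw [ih]
      simp
    · simp only [List.foldl_cons, List.filter_cons, if_neg hb]
      exact ih a1 a2

lemma pvFilterMin (r : List Int) (hpair : r.Pairwise (· < ·)) :
    ∀ (pc : List Int) (m : Int), pc.Nodup → m ∈ pc → (∀ x ∈ pc, m ≤ x) → (∀ x ∈ pc, x ∈ r) →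
    r.filter (fun x => decide (x ∈ pc)) = m :: r.filter (fun x => decide (x ∈ pc.erase m)) := by
  induction r with
  | nil =>
    intro pc m _ hm _ hsub
    exact absurd (hsub m hm) (by simp)
  | cons a r ih =>
    intro pc m hnd hm hmin hsub
    rcases List.pairwise_cons.mp hpair with ⟨halt, hpair'⟩
    by_cases ha : a ∈ pc
    · have ham : a = m := by
        by_contra hne
        have hmr : m ∈ a :: r := hsub m hm
        have hmr' : m ∈ r := by
          rcases List.mem_cons.mp hmr with h | h
          · exact absurd h.symm hne
          · exact h
        have h1 := halt m hmr'
        have h2 := hmin a ha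
        omega
      subst ham
      have hanr : a ∉ r := fun h => absurd (halt a h) (lt_irrefl a)
      have hnotin : a ∉ pc.erase a := fun h => absurd ((List.Nodup.mem_erase_iff hnd).mp h).1 (by simp)
      simp only [List.filter_cons, ha, hnotin, decide_true, decide_false, if_true, if_false,
        Bool.false_eq_true]
      congr 1
      apply List.filter_congr
      intro x hx
      have hxa : x ≠ a := fun he => hanr (he ▸ hx)
      simp [List.Nodup.mem_erase_iff hnd, hxa]
    · have ha' : a ∉ pc.erase m := fun h => ha (List.mem_of_mem_erase h)
      simp only [List.filter_cons, ha, ha', decide_false]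
      exact ih hpair' pc m hnd hm hmin (fun x hx => by
        rcases List.mem_cons.mp (hsub x hx) with h | h
        · exact absurd (h ▸ hx) ha
        · exact h)

lemma pvLoopSpec (n : Int) :
    ∀ (fuel : Nat) (acc : List Char) (pe : List String) (pc : List Int),
    pc.length = fuel → pc.Nodup → (∀ x ∈ pc, x ∈ pvAsc) →
    (pvSelLoop n fuel (acc, pe, pc)).1
      = acc ++ (pvAsc.filter (fun x => decide (x ∈ pc))).flatMap
          (fun m => PySem.List.pyRepeat (change_keys_values.getD m "").toList n) := by
  intro fuel
  induction fuel with
  | zero =>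
    intro acc pe pc hlen _ _
    have hpc : pc = [] := List.eq_nil_of_length_eq_zero hlen
    subst hpc
    simp [pvSelLoop]
  | succ fuel ih =>
    intro acc pe pc hlen hnd hsub
    have hne : pc ≠ [] := by intro h; subst h; simp at hlen
    obtain ⟨m, hm⟩ : ∃ m, PySem.List.min? pc (fun x => x) = some m := by
      cases h : PySem.List.min? pc (fun x => x) with
      | none => exact absurd ((PySem.List.min?_eq_none_iff _ _).mp h) hne
      | some m => exact ⟨m, rfl⟩
    have hmem := PySem.List.min?_mem hm
    have hmin : ∀ y ∈ pc, m ≤ y := PySem.List.min?_isMin hm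
    have hrem := PySem.List.remove?_eq_some_erase pc m hmem
    rw [pvSelLoop]
    simp only [pvSelStep, hm, hrem, Option.getD_some]
    rw [ih _ _ (pc.erase m)
      (by rw [List.length_erase_of_mem hmem, hlen]; omega)
      (hnd.erase m)
      (fun x hx => hsub x (List.mem_of_mem_erase hx))]
    rw [pvFilterMin pvAsc pvAscPairwise pc m hnd hmem hmin hsub]
    simp [List.flatMap_cons, List.append_assoc]

lemma pvMain (v : Int) (ce : List (String × Int)) (hpre : Pre_unequal_method v ce) :
    unequal_method v ce = unequal_method_alt v ce := by
  have hknd : (PySem.Dict.ofList ce).keys.Nodup := PySem.Dict.nodup_keys_ofList ce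
  set cd := PySem.Dict.ofList ce with hcd
  set sel := cd.keys.filter (fun k => cd.getD k 0 == v) with hsel
  have hselnd : sel.Nodup := hknd.filter _
  have hlet : ∀ k ∈ sel, k ∈ pvLetters := by
    intro k hk
    have hk' := List.mem_filter.mp hk
    have hmem : (k, cd.getD k 0) ∈ cd.items := by
      rw [PySem.Dict.items_eq_map_keys cd hknd 0]
      exact List.mem_map_of_mem hk'.1
    have hv : cd.getD k 0 = v := by simpa using hk'.2
    exact hpre _ hmem hv
  set pc := sel.map (fun k => dict_of_english.getD k 0) with hpc
  have hpcnd : pc.Nodup :=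
    List.Nodup.map_on (fun x hx y hy h => pvPrioInj x (hlet x hx) y (hlet y hy) h) hselnd
  have hpcsub : ∀ x ∈ pc, x ∈ pvAsc := by
    intro x hx
    obtain ⟨k, hk, rfl⟩ := List.mem_map.mp hx
    exact pvPrioMemAsc k (hlet k hk)
  -- A's value
  have hA : unequal_method v ce = String.ofList
      ((pvAsc.filter (fun x => decide (x ∈ pc))).flatMap
        (fun m => PySem.List.pyRepeat (change_keys_values.getD m "").toList v)) := by
    rw [unequal_method]
    rw [pvPairFold]
    simp only [List.nil_append, ← hcd, ← hsel, ← hpc]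
    rw [pvLoopSpec v sel.length [] sel pc (by simp [hpc]) hpcnd hpcsub]
    simp
  -- membership bridge
  have hmemiff : ∀ c ∈ pvAlphabet,
      (decide (pvPrio c ∈ pc)) = (cd.get? (String.ofList [c]) == some v) := by
    intro c hc
    have hiff : (pvPrio c ∈ pc) ↔ cd.get? (String.ofList [c]) = some v := by
      constructor
      · intro hmem
        obtain ⟨k, hk, hkeq⟩ := List.mem_map.mp hmem
        have hkl := hlet k hk
        have hkc : k = String.ofList [c] :=
          pvPrioInj k hkl (String.ofList [c]) (List.mem_map_of_mem hc) hkeq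
        subst hkc
        have hk' := List.mem_filter.mp hk
        have hcont : cd.contains (String.ofList [c]) = true :=
          (PySem.Dict.contains_iff_mem_keys cd _).mpr hk'.1
        rw [PySem.Dict.contains_eq_isSome_get?] at hcont
        obtain ⟨w, hw⟩ := Option.isSome_iff_exists.mp hcont
        have hgd := PySem.Dict.getD_of_get?_eq_some cd 0 hw
        have hv : cd.getD (String.ofList [c]) 0 = v := by simpa using hk'.2
        rw [hw, hgd.symm.trans hv]
      · intro hq
        have hkmem : String.ofList [c] ∈ cd.keys := by
          by_contra h
          rw [← PySem.Dict.get?_eq_none_iff_not_mem_keys] at h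
          rw [h] at hq
          simp at hq
        have hgd : cd.getD (String.ofList [c]) 0 = v :=
          PySem.Dict.getD_of_get?_eq_some cd 0 hq
        have hksel : String.ofList [c] ∈ sel :=
          List.mem_filter.mpr ⟨hkmem, by simp [hgd]⟩
        exact List.mem_map.mpr ⟨String.ofList [c], hksel, rfl⟩
    rw [Bool.eq_iff_iff]
    simp [hiff]
  -- B's value
  have hB : unequal_method_alt v ce = String.ofList
      ((pvAlphabet.filter (fun c => cd.get? (String.ofList [c]) == some v)).flatMap
        (fun c => PySem.List.pyRepeat [c] v)) := by
    rw [unequal_method_alt]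
    set parts := ((pvAlphabet.filter (fun c => cd.get? (String.ofList [c]) == some v)).map
      (fun c => String.ofList (PySem.List.pyRepeat [c] v))) with hparts
    have h2 : ∀ (L : List (List Char)), PySem.Chars.join "".toList L = L.flatten := by
      intro L; simp [PySem.Chars.join, pvIntercalateNil]
    have h1 : (PySem.Str.join "" parts).toList
        = (pvAlphabet.filter (fun c => cd.get? (String.ofList [c]) == some v)).flatMap
            (fun c => PySem.List.pyRepeat [c] v) := by
      rw [PySem.Str.toList_join, h2]
      simp [hparts, List.map_map, Function.comp_def, List.flatMap_def]
    rw [← h1, String.ofList_toList]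
  rw [hA, hB]
  congr 1
  rw [show pvAsc = pvAlphabet.map pvPrio from pvMapPrio.symm]
  rw [List.filter_map, List.flatMap_map]
  rw [List.filter_congr (p := (fun x => decide (x ∈ pc)) ∘ pvPrio)
        (q := fun c => cd.get? (String.ofList [c]) == some v)
        (fun c hc => by simpa [Function.comp] using hmemiff c hc)]
  rw [List.flatMap_def, List.flatMap_def]
  congr 1
  apply List.map_congr_left
  intro c hc
  rw [pvChangeLetter c (List.mem_of_mem_filter hc), String.toList_ofList]

-- ===== VERDICT (by name: the statement is the Claim_ definition above) =====
theorem unequal_method_spec : Claim_equal_unequal_method := by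
  intro v ce _ hpre
  simpa [Spec_unequal_method] using pvMain v ce hpre
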